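-- pv_equiv track=rewrite | github.com/PauloVieirra/seadocs | rag_service/summary_cache.py | sections_hash
-- ===== SOURCE A (Python) =====
-- def sections_hash(sections: list[dict]) -> str:
--     """Gera hash das seções para chave de cache."""
--     parts = []
--     for s in sorted(sections, key=lambda x: x.get("id", "")):
--         parts.append(f"{s.get('id', '')}|{s.get('title', '')}|{s.get('helpText', '')}")
--     s = ";".join(parts)
--     h = 0
--     for c in s:
--         h = ((h << 5) - h + ord(c)) & 0xFFFFFFFF
--     return str(h)
-- ===== SOURCE B (Python) =====
-- def sections_hash(sections: list[dict]) -> str: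
--     """Gera hash das seções para chave de cache."""
--     M = 1 << 32
--     s = ";".join(
--         f"{x.get('id', '')}|{x.get('title', '')}|{x.get('helpText', '')}"
--         for x in sorted(sections, key=lambda x: x.get("id", ""))
--     )
--     # ((h<<5)-h+c) & 0xFFFFFFFF is Horner's rule base 31 mod 2^32; evaluate the
--     # same polynomial in closed form, right-to-left, with a running power of 31.
--     h, p = 0, 1
--     for c in reversed(s):
--         h = (h + ord(c) * p) % M
--         p = p * 31 % M
--     return str(h)
-- ===== Notes on version B (the rewrite author's own statement) =====
-- stated objective: alternative
-- what changed: B replaces the Horner recurrence h=((h<<5)-h+ord(c))&0xFFFFFFFF with its closed form: a right-to-left pass that accumulates ord(c)*31^k mod 2^32 with a running power of 31, which is correct because (h<<5)-h = 31*h and the mask is reduction mod 2^32.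
import Mathlib
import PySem

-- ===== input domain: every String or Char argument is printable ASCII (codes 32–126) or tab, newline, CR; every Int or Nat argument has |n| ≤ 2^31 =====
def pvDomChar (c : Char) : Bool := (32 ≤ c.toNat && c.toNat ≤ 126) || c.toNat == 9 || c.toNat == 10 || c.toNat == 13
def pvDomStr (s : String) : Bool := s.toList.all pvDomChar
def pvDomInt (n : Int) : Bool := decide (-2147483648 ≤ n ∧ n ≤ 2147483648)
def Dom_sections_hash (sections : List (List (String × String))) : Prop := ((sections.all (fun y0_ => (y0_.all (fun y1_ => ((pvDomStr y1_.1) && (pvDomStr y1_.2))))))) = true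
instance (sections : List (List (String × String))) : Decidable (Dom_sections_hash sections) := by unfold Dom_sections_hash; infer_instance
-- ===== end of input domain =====

-- B replaces the Horner recurrence ((h<<5)-h+c)&0xFFFFFFFF by its closed form:
-- a right-to-left pass accumulating ord(c)*31^k mod 2^32 with a running power of 31;
-- objective: alternative algorithm of the same cost class.

-- shared helpers: dict .get(k, ""), the per-section f-string, and the sort key
def pvField (s : List (String × String)) (k : String) : List Char :=
  (PySem.Dict.getD (PySem.Dict.mk s) k "").toList

def pvEntry (s : List (String × String)) : List Char :=
  pvField s "id" ++ '|' :: pvField s "title" ++ '|' :: pvField s "helpText"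

def pvKey (x : List (String × String)) : String :=
  PySem.Dict.getD (PySem.Dict.mk x) "id" ""

-- ===== PORT A =====
-- A's hash step: h = ((h << 5) - h + ord(c)) & 0xFFFFFFFF (h stays ≥ 0, so Nat is exact)
def pvHashStep (h : Nat) (c : Char) : Nat :=
  ((h <<< 5) - h + c.toNat) &&& 0xFFFFFFFF

def sections_hash (sections : List (List (String × String))) : String :=
  let parts := (PySem.List.sorted sections pvKey).map pvEntry
  let s := PySem.Chars.join [';'] parts
  PySem.Int.toStr ((s.foldl pvHashStep 0 : Nat) : Int)

-- ===== PORT B =====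
-- B's step over the reversed string: state (h, p); h += ord(c)*p, p *= 31, both mod 2^32
def pvPowStep (st : Nat × Nat) (c : Char) : Nat × Nat :=
  ((st.1 + c.toNat * st.2) % 4294967296, st.2 * 31 % 4294967296)

def sections_hash_alt (sections : List (List (String × String))) : String :=
  let s := PySem.Chars.join [';'] ((PySem.List.sorted sections pvKey).map pvEntry)
  let st := s.reverse.foldl pvPowStep (0, 1)
  PySem.Int.toStr ((st.1 : Nat) : Int)

-- ===== PRECONDITION & SPEC =====
def Spec_sections_hash (sections : List (List (String × String))) (out : String) : Prop := out = sections_hash_alt sections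
instance (sections : List (List (String × String))) (out : String) : Decidable (Spec_sections_hash sections out) := by unfold Spec_sections_hash; infer_instance

-- ===== CLAIM =====
def Claim_equal_sections_hash : Prop := ∀ (sections : List (List (String × String))), Dom_sections_hash sections → Spec_sections_hash sections (sections_hash sections)

-- ===== LEMMAS AND PROOFS =====

-- the unmasked Horner fold
def pvHorner (s : List Char) (a : Nat) : Nat := s.foldl (fun a c => 31 * a + c.toNat) a

lemma pvHorner_shift (s : List Char) : ∀ a : Nat,
    pvHorner s a = a * 31 ^ s.length + pvHorner s 0 := by
  induction s with
  | nil => intro a; simp [pvHorner]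
  | cons c t ih =>
      intro a
      have ha : ∀ b : Nat, pvHorner (c :: t) b = pvHorner t (31 * b + c.toNat) := fun _ => rfl
      rw [ha a, ha 0, ih (31 * a + c.toNat), ih (31 * 0 + c.toNat), List.length_cons]
      ring

-- one masked step is the unmasked step mod 2^32
lemma pvHashStep_eq (h : Nat) (c : Char) :
    pvHashStep h c = (31 * h + c.toNat) % 4294967296 := by
  unfold pvHashStep
  rw [Nat.and_two_pow_sub_one_eq_mod _ 32]
  congr 1
  have : h <<< 5 = 32 * h := by rw [Nat.shiftLeft_eq]; ring
  omega

-- A's masked fold computes the unmasked Horner value mod 2^32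
lemma pvFold_mod (s : List Char) : ∀ h : Nat,
    s.foldl pvHashStep (h % 4294967296) = pvHorner s h % 4294967296 := by
  induction s with
  | nil => intro h; simp [pvHorner]
  | cons c t ih =>
      intro h
      have key : (31 * (h % 4294967296) + c.toNat) % 4294967296
          = (31 * h + c.toNat) % 4294967296 :=
        ((Nat.mod_modEq h 4294967296).mul_left 31).add_right c.toNat
      show t.foldl pvHashStep (pvHashStep (h % 4294967296) c)
          = pvHorner t (31 * h + c.toNat) % 4294967296
      rw [pvHashStep_eq, key, ih]

-- B's reversed fold computes the same Horner value mod 2^32 (and tracks 31^len)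
lemma pvRev_fold (s : List Char) :
    s.reverse.foldl pvPowStep (0, 1)
      = (pvHorner s 0 % 4294967296, 31 ^ s.length % 4294967296) := by
  rw [List.foldl_reverse]
  induction s with
  | nil => simp [pvHorner]
  | cons c t ih =>
      rw [List.foldr_cons, ih]
      have hc : pvHorner (c :: t) 0 = pvHorner t c.toNat := by norm_num [pvHorner]
      simp only [pvPowStep, Prod.mk.injEq, List.length_cons]
      refine ⟨?_, ?_⟩
      · rw [hc, pvHorner_shift t c.toNat]
        have hm : (pvHorner t 0 % 4294967296 + c.toNat * (31 ^ t.length % 4294967296)) % 4294967296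
            = (pvHorner t 0 + c.toNat * 31 ^ t.length) % 4294967296 :=
          (Nat.mod_modEq (pvHorner t 0) 4294967296).add
            ((Nat.mod_modEq (31 ^ t.length) 4294967296).mul_left c.toNat)
        rw [hm, Nat.add_comm]
      · have hm : (31 ^ t.length % 4294967296) * 31 % 4294967296
            = 31 ^ t.length * 31 % 4294967296 :=
          (Nat.mod_modEq (31 ^ t.length) 4294967296).mul_right 31
        rw [hm, ← pow_succ]

-- ===== VERDICT =====
theorem sections_hash_spec : Claim_equal_sections_hash := by
  intro sections _
  unfold Spec_sections_hash
  simp only [sections_hash, sections_hash_alt, pvRev_fold]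
  have h0 : (0 : Nat) = 0 % 4294967296 := by norm_num
  conv_lhs => rw [h0, pvFold_mod]
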